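-- pv_equiv track=rewrite | github.com/skaphle/adventofcode2022 | 15/beacon_exclusion_zone.py | find_possible_locations_fast
-- ===== SOURCE A (Python) =====
-- def find_possible_locations_fast(sensor_list: list, radius_list: list, max_: int) -> list:
--     # new faster strategy:
--     # instead of all coords, only check the outline of each sensor's area
--     possible = []
--     #indices = sorted(list(range(len(sensor_list))), key=sensor_list.__getitem__)
--     indices = sorted(list(range(len(sensor_list))), key=radius_list.__getitem__, reverse=True)
--     for i in indices:
--         s = sensor_list[i]
--         r = radius_list[i]
--         # -- loop over x/y, coordinates for outline+1, add to candidates list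
--         for j in range(4*(r+1)):
--             # go clockwise 12-3-6-9-12
--             if j < r+1:
--                 x = s[0] + j
--             elif j < 3*(r+1):
--                 x = s[0] + 2*(r+1) - j
--             else:
--                 x = s[0] - 4*(r+1) + j
--             if j < 2*(r+1):
--                 y = s[1] - (r+1) + j
--             else:
--                 y = s[1] + 3*(r+1) - j
--             if x < 0 or x > max_ or y < 0 or y > max_:
--                 continue
--             # second loop over sensors to eliminate candidates
--             # (don't append 50M candidate tuples to a list)
--             is_possible = True
--             for j in indices:
--                 s2 = sensor_list[j]
--                 r2 = radius_list[j]
--                 dx = s2[0] - x if s2[0] > x else x - s2[0]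
--                 #dx = abs(s[0]-x)
--                 dy = s2[1] - y if s2[1] > y else y - s2[1]
--                 #dy = abs(s[1]-y)
--                 if dx + dy <= r2:
--                     is_possible = False
--                     break
--             if is_possible:
--                 possible.append((x, y))
--     # make unique
--     return list(set(possible))
-- ===== SOURCE B (Python) =====
-- def _edge_points(pairs, max_, r, x0, gx, y0, gy):
--     # k-range [lo, hi] from 0 <= x,y <= max_ intersected with [0, r]
--     lo, hi = 0, r
--     if gx == 1:
--         lo = max(lo, -x0); hi = min(hi, max_ - x0)
--     else:
--         lo = max(lo, x0 - max_); hi = min(hi, x0)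
--     if gy == 1:
--         lo = max(lo, -y0); hi = min(hi, max_ - y0)
--     else:
--         lo = max(lo, y0 - max_); hi = min(hi, y0)
--     # each sensor covers a contiguous k-interval of this edge (or nothing)
--     ivs = []
--     for (px, py), r2 in pairs:
--         u = gx * (px - x0)
--         v = gy * (py - y0)
--         d = u - v if u > v else v - u
--         if d <= r2:
--             ivs.append((-((r2 - u - v) // 2), (u + v + r2) // 2))
--     ivs.sort(key=lambda iv: iv[0])
--     # sweep the sorted intervals, emitting the uncovered k in increasing order
--     pts = []
--     t = lo
--     for a, b in ivs:
--         if b < t: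
--             continue
--         if a > t:
--             for k in range(t, min(a - 1, hi) + 1):
--                 pts.append((x0 + gx * k, y0 + gy * k))
--         t = b + 1
--     for k in range(t, hi + 1):
--         pts.append((x0 + gx * k, y0 + gy * k))
--     return pts
--
--
-- def find_possible_locations_fast(sensor_list: list, radius_list: list, max_: int) -> list:
--     order = sorted(range(len(sensor_list)), key=radius_list.__getitem__, reverse=True)
--     pairs = [(sensor_list[i], radius_list[i]) for i in order]
--     out = []
--     for (sx, sy), r in pairs:
--         for x0, gx, y0, gy in ((sx, 1, sy - (r + 1), 1),
--                                (sx + r + 1, -1, sy, 1),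
--                                (sx, -1, sy + r + 1, -1),
--                                (sx - (r + 1), 1, sy, -1)):
--             out.extend(_edge_points(pairs, max_, r, x0, gx, y0, gy))
--     return list(set(out))
-- ===== Notes on version B (the rewrite author's own statement) =====
-- stated objective: faster
-- what changed: Instead of testing every perimeter point against every sensor, B computes for each diamond edge the contiguous k-interval each sensor covers on that edge, sorts the intervals and sweeps them once, emitting only the uncovered points, so the per-candidate scan over all sensors disappears.
import Mathlib
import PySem

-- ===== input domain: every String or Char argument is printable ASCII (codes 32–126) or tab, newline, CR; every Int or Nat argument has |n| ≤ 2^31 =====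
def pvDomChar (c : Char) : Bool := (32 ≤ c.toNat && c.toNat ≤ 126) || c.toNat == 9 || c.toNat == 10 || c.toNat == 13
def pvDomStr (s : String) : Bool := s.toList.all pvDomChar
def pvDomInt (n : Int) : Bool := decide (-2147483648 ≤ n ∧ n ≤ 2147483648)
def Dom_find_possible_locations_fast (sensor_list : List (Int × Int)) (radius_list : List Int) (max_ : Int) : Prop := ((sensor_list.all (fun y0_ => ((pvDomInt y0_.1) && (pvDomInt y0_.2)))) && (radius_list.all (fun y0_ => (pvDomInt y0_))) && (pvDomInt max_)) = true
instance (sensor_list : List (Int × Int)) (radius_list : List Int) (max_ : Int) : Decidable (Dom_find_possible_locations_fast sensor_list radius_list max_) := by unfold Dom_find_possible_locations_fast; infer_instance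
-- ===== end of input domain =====

-- B replaces A's per-perimeter-point scan over all sensors by, per diamond edge, covered
-- k-intervals that are sorted and swept once (asymptotically faster; same return value).
-- Both programs' final list(set(...)) is modelled as first-insertion-order dedup (PySem.Set.ofList); outputs are compared as sets.

-- ===== PORT A =====
-- inner 'for j in indices: … break' loop computing is_possible
def pvIsPossibleA (sensor_list : List (Int × Int)) (radius_list : List Int) (x y : Int) : List Int → Bool
  | [] => true
  | j :: rest =>
    let s2 := PySem.List.pyGetD sensor_list j ((0 : Int), (0 : Int))
    let r2 := PySem.List.pyGetD radius_list j 0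
    let dx := if s2.1 > x then s2.1 - x else x - s2.1
    let dy := if s2.2 > y then s2.2 - y else y - s2.2
    if dx + dy ≤ r2 then false else pvIsPossibleA sensor_list radius_list x y rest

def find_possible_locations_fast (sensor_list : List (Int × Int)) (radius_list : List Int) (max_ : Int) : List (Int × Int) :=
  let indices := PySem.List.sorted (PySem.List.pyRange 0 (sensor_list.length : Int) 1)
      (fun i => PySem.List.pyGetD radius_list i 0) true
  let possible : List (Int × Int) := indices.foldl (fun acc i =>
    let s := PySem.List.pyGetD sensor_list i ((0 : Int), (0 : Int))
    let r := PySem.List.pyGetD radius_list i 0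
    (PySem.List.pyRange 0 (4 * (r + 1)) 1).foldl (fun acc j =>
      let x := if j < r + 1 then s.1 + j
               else if j < 3 * (r + 1) then s.1 + 2 * (r + 1) - j
               else s.1 - 4 * (r + 1) + j
      let y := if j < 2 * (r + 1) then s.2 - (r + 1) + j else s.2 + 3 * (r + 1) - j
      if x < 0 ∨ x > max_ ∨ y < 0 ∨ y > max_ then acc
      else if pvIsPossibleA sensor_list radius_list x y indices then acc ++ [(x, y)] else acc) acc) []
  PySem.Set.ofList possible

-- ===== PORT B =====
def pvEdgePoints (pairs : List ((Int × Int) × Int)) (max_ r x0 gx y0 gy : Int) : List (Int × Int) :=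
  let lo : Int := 0
  let hi : Int := r
  let lo := if gx = 1 then max lo (-x0) else max lo (x0 - max_)
  let hi := if gx = 1 then min hi (max_ - x0) else min hi x0
  let lo := if gy = 1 then max lo (-y0) else max lo (y0 - max_)
  let hi := if gy = 1 then min hi (max_ - y0) else min hi y0
  let ivs : List (Int × Int) := pairs.foldl (fun acc pr =>
    let u := gx * (pr.1.1 - x0)
    let v := gy * (pr.1.2 - y0)
    let d := if u > v then u - v else v - u
    if d ≤ pr.2 then
      acc ++ [(-(PySem.Int.floordiv (pr.2 - u - v) 2), PySem.Int.floordiv (u + v + pr.2) 2)]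
    else acc) []
  let ivs := PySem.List.sorted ivs (fun iv => iv.1) false
  let st := ivs.foldl (fun st iv =>
    if iv.2 < st.1 then st
    else (iv.2 + 1, st.2 ++ (if iv.1 > st.1 then
      (PySem.List.pyRange st.1 (min (iv.1 - 1) hi + 1) 1).map (fun k => (x0 + gx * k, y0 + gy * k))
      else []))) ((lo, ([] : List (Int × Int))))
  st.2 ++ (PySem.List.pyRange st.1 (hi + 1) 1).map (fun k => (x0 + gx * k, y0 + gy * k))

def find_possible_locations_fast_alt (sensor_list : List (Int × Int)) (radius_list : List Int) (max_ : Int) : List (Int × Int) :=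
  let order := PySem.List.sorted (PySem.List.pyRange 0 (sensor_list.length : Int) 1)
      (fun i => PySem.List.pyGetD radius_list i 0) true
  let pairs := order.map (fun i =>
    (PySem.List.pyGetD sensor_list i ((0 : Int), (0 : Int)), PySem.List.pyGetD radius_list i 0))
  let out : List (Int × Int) := pairs.foldl (fun acc pr =>
    let sx := pr.1.1
    let sy := pr.1.2
    let r := pr.2
    ([(sx, 1, sy - (r + 1), 1), (sx + r + 1, -1, sy, 1),
      (sx, -1, sy + r + 1, -1), (sx - (r + 1), 1, sy, -1)] : List (Int × Int × Int × Int)).foldl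
      (fun acc e => acc ++ pvEdgePoints pairs max_ r e.1 e.2.1 e.2.2.1 e.2.2.2) acc) []
  PySem.Set.ofList out

-- ===== PRECONDITION & SPEC =====
-- Pre_ excludes only inputs where radius_list is shorter than sensor_list, on which A raises IndexError.
def Pre_find_possible_locations_fast (sensor_list : List (Int × Int)) (radius_list : List Int) (max_ : Int) : Prop :=
  sensor_list.length ≤ radius_list.length
instance (sensor_list : List (Int × Int)) (radius_list : List Int) (max_ : Int) : Decidable (Pre_find_possible_locations_fast sensor_list radius_list max_) := by unfold Pre_find_possible_locations_fast; infer_instance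

def pvWitness_find_possible_locations_fast : (List (Int × Int)) × List Int × Int := ([(2, 2)], [1], 4)

def Spec_find_possible_locations_fast (sensor_list : List (Int × Int)) (radius_list : List Int) (max_ : Int) (out : List (Int × Int)) : Prop := out = find_possible_locations_fast_alt sensor_list radius_list max_
instance (sensor_list : List (Int × Int)) (radius_list : List Int) (max_ : Int) (out : List (Int × Int)) : Decidable (Spec_find_possible_locations_fast sensor_list radius_list max_ out) := by unfold Spec_find_possible_locations_fast; infer_instance

-- ===== CLAIM (what is proved, stated in full; the proofs are below) =====
def Claim_equal_find_possible_locations_fast : Prop := ∀ (sensor_list : List (Int × Int)) (radius_list : List Int) (max_ : Int), Dom_find_possible_locations_fast sensor_list radius_list max_ → Pre_find_possible_locations_fast sensor_list radius_list max_ → Spec_find_possible_locations_fast sensor_list radius_list max_ (find_possible_locations_fast sensor_list radius_list max_)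

-- ===== LEMMAS AND PROOFS =====

-- proof-side abbreviations
def pvMk (sl : List (Int × Int)) (rl : List Int) (j : Int) : (Int × Int) × Int :=
  (PySem.List.pyGetD sl j ((0 : Int), (0 : Int)), PySem.List.pyGetD rl j 0)

def pvXA (s : Int × Int) (r j : Int) : Int :=
  if j < r + 1 then s.1 + j else if j < 3 * (r + 1) then s.1 + 2 * (r + 1) - j else s.1 - 4 * (r + 1) + j

def pvYA (s : Int × Int) (r j : Int) : Int :=
  if j < 2 * (r + 1) then s.2 - (r + 1) + j else s.2 + 3 * (r + 1) - j

def pvGoodA (sl : List (Int × Int)) (rl : List Int) (idx : List Int) (mx : Int) (s : Int × Int) (r j : Int) : Bool :=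
  !(decide (pvXA s r j < 0 ∨ pvXA s r j > mx ∨ pvYA s r j < 0 ∨ pvYA s r j > mx)) &&
    pvIsPossibleA sl rl (pvXA s r j) (pvYA s r j) idx

-- B's per-edge bounds and covered interval, written out
def pvLoE (mx x0 gx y0 gy : Int) : Int :=
  if gy = 1 then max (if gx = 1 then max 0 (-x0) else max 0 (x0 - mx)) (-y0)
  else max (if gx = 1 then max 0 (-x0) else max 0 (x0 - mx)) (y0 - mx)

def pvHiE (mx r x0 gx y0 gy : Int) : Int :=
  if gy = 1 then min (if gx = 1 then min r (mx - x0) else min r x0) (mx - y0)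
  else min (if gx = 1 then min r (mx - x0) else min r x0) y0

def pvCovB (pr : (Int × Int) × Int) (x0 gx y0 gy k : Int) : Bool :=
  decide ((if gx * (pr.1.1 - x0) > gy * (pr.1.2 - y0) then gx * (pr.1.1 - x0) - gy * (pr.1.2 - y0)
           else gy * (pr.1.2 - y0) - gx * (pr.1.1 - x0)) ≤ pr.2) &&
  (decide (-(PySem.Int.floordiv (pr.2 - gx * (pr.1.1 - x0) - gy * (pr.1.2 - y0)) 2) ≤ k) &&
   decide (k ≤ PySem.Int.floordiv (gx * (pr.1.1 - x0) + gy * (pr.1.2 - y0) + pr.2) 2))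

lemma pvIsPossibleA_eq_not_any (sl : List (Int × Int)) (rl : List Int) (x y : Int) (idx : List Int) :
    pvIsPossibleA sl rl x y idx =
      !(idx.any (fun j =>
        decide ((if (pvMk sl rl j).1.1 > x then (pvMk sl rl j).1.1 - x else x - (pvMk sl rl j).1.1) +
          (if (pvMk sl rl j).1.2 > y then (pvMk sl rl j).1.2 - y else y - (pvMk sl rl j).1.2)
          ≤ (pvMk sl rl j).2))) := by
  induction idx with
  | nil => simp [pvIsPossibleA]
  | cons j rest ih =>
    simp only [pvIsPossibleA, List.any_cons, Bool.not_or, pvMk]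
    by_cases h : (if (PySem.List.pyGetD sl j ((0 : Int), (0 : Int))).1 > x then (PySem.List.pyGetD sl j ((0 : Int), (0 : Int))).1 - x else x - (PySem.List.pyGetD sl j ((0 : Int), (0 : Int))).1) +
        (if (PySem.List.pyGetD sl j ((0 : Int), (0 : Int))).2 > y then (PySem.List.pyGetD sl j ((0 : Int), (0 : Int))).2 - y else y - (PySem.List.pyGetD sl j ((0 : Int), (0 : Int))).2)
          ≤ PySem.List.pyGetD rl j 0
    · simp [h]
    · simp [h, ih, pvMk]

lemma pvFilter_le_le_pyRange (c d : Int) : ∀ (n : Nat) (a b : Int), (b - a).toNat = n →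
    (PySem.List.pyRange a b 1).filter (fun k => decide (c ≤ k) && decide (k ≤ d)) =
      PySem.List.pyRange (max a c) (min b (d + 1)) 1 := by
  intro n
  induction n with
  | zero =>
    intro a b h
    rw [PySem.List.pyRange_one_eq_nil (by omega), PySem.List.pyRange_one_eq_nil (by omega)]
    rfl
  | succ n ih =>
    intro a b h
    rw [PySem.List.pyRange_one_cons (by omega)]
    by_cases hc : c ≤ a
    · by_cases hd : a ≤ d
      · rw [List.filter_cons_of_pos (by simp [hc, hd]), ih (a+1) b (by omega),
          show max (a+1) c = a + 1 by omega,
          show max a c = a by omega,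
          ← PySem.List.pyRange_one_cons (show a < min b (d+1) by omega)]
      · rw [List.filter_cons_of_neg (by simp; omega), ih (a+1) b (by omega),
          PySem.List.pyRange_one_eq_nil (by omega), PySem.List.pyRange_one_eq_nil (by omega)]
    · rw [List.filter_cons_of_neg (by simp; omega), ih (a+1) b (by omega),
        show max (a+1) c = max a c by omega]

lemma pvFilter_lt_pyRange (c : Int) (a b : Int) :
    (PySem.List.pyRange a b 1).filter (fun k => decide (k < c)) = PySem.List.pyRange a (min b c) 1 := by
  have h : ∀ k ∈ PySem.List.pyRange a b 1, (decide (k < c)) = (decide (a ≤ k) && decide (k ≤ c - 1)) := by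
    intro k hk
    rw [PySem.List.mem_pyRange_one] at hk
    by_cases h1 : a ≤ k <;> by_cases h2 : k ≤ c - 1 <;> simp [h1, h2] <;> omega
  rw [List.filter_congr h, pvFilter_le_le_pyRange a (c-1) (b - a).toNat a b rfl,
    show max a a = a by omega, show c - 1 + 1 = c by omega]

lemma pvPyRange_shift (a b : Int) :
    PySem.List.pyRange a b 1 = (PySem.List.pyRange 0 (b - a) 1).map (fun k => a + k) := by
  rw [PySem.List.pyRange_one, PySem.List.pyRange_one, List.map_map]
  simp

lemma pvSweep_spec (point : Int → (Int × Int)) (hi : Int) :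
    ∀ (ivs : List (Int × Int)) (t : Int) (acc : List (Int × Int)),
    ivs.Pairwise (fun p q => p.1 ≤ q.1) →
    (∀ iv ∈ ivs, iv.1 ≤ iv.2) →
    ((ivs.foldl (fun st iv =>
        if iv.2 < st.1 then st
        else (iv.2 + 1, st.2 ++ (if iv.1 > st.1 then
          (PySem.List.pyRange st.1 (min (iv.1 - 1) hi + 1) 1).map point else []))) ((t, acc))).2
      ++ (PySem.List.pyRange ((ivs.foldl (fun st iv =>
        if iv.2 < st.1 then st
        else (iv.2 + 1, st.2 ++ (if iv.1 > st.1 then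
          (PySem.List.pyRange st.1 (min (iv.1 - 1) hi + 1) 1).map point else []))) ((t, acc))).1) (hi + 1) 1).map point)
    = acc ++ ((PySem.List.pyRange t (hi + 1) 1).filter
        (fun k => !(ivs.any (fun iv => decide (iv.1 ≤ k) && decide (k ≤ iv.2))))).map point := by
  intro ivs
  induction ivs with
  | nil =>
    intro t acc _ _
    simp
  | cons iv rest ih =>
    intro t acc hpw hab
    obtain ⟨h1, hpw'⟩ := List.pairwise_cons.mp hpw
    have hab' : ∀ p ∈ rest, p.1 ≤ p.2 := fun p hp => hab p (List.mem_cons_of_mem _ hp)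
    have habiv : iv.1 ≤ iv.2 := hab iv List.mem_cons_self
    simp only [List.foldl_cons]
    by_cases hskip : iv.2 < t
    · rw [if_pos hskip]
      rw [ih t acc hpw' hab']
      congr 1
      apply congrArg (List.map point)
      apply List.filter_congr
      intro k hk
      rw [PySem.List.mem_pyRange_one] at hk
      have hiv : (decide (iv.1 ≤ k) && decide (k ≤ iv.2)) = false := by
        simp only [Bool.and_eq_false_iff, decide_eq_false_iff_not]
        omega
      simp [hiv]
    · rw [if_neg hskip]
      rw [ih (iv.2 + 1) _ hpw' hab']
      by_cases hth : t ≤ hi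
      · have hM1 : t ≤ min (iv.2 + 1) (hi + 1) := by omega
        have hM2 : min (iv.2 + 1) (hi + 1) ≤ hi + 1 := by omega
        rw [PySem.List.pyRange_one_append t (min (iv.2 + 1) (hi + 1)) (hi + 1) hM1 hM2,
          List.filter_append, List.map_append, ← List.append_assoc]
        congr 1
        · congr 1
          have hfc : ∀ k ∈ PySem.List.pyRange t (min (iv.2 + 1) (hi + 1)) 1,
              (!(((iv :: rest).any (fun p => decide (p.1 ≤ k) && decide (k ≤ p.2))))) =
              (decide (k < iv.1)) := by
            intro k hk
            rw [PySem.List.mem_pyRange_one] at hk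
            by_cases hlt : k < iv.1
            · have hrest : rest.any (fun p => decide (p.1 ≤ k) && decide (k ≤ p.2)) = false := by
                rw [List.any_eq_false]
                intro p hp
                have := h1 p hp
                simp only [Bool.and_eq_true, decide_eq_true_eq, not_and]
                omega
              simp [hrest, hlt]
            · simp only [List.any_cons]
              have hiv : (decide (iv.1 ≤ k) && decide (k ≤ iv.2)) = true := by
                simp only [Bool.and_eq_true, decide_eq_true_eq]
                omega
              simp [hiv, hlt]
          rw [List.filter_congr hfc, pvFilter_lt_pyRange]
          by_cases hgt : iv.1 > t
          · rw [if_pos hgt]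
            congr 2
            omega
          · rw [if_neg hgt, PySem.List.pyRange_one_eq_nil (by omega)]
            simp
        · apply congrArg (List.map point)
          by_cases hle : iv.2 + 1 ≤ hi + 1
          · rw [show min (iv.2 + 1) (hi + 1) = iv.2 + 1 by omega]
            apply List.filter_congr
            intro k hk
            rw [PySem.List.mem_pyRange_one] at hk
            have hiv : (decide (iv.1 ≤ k) && decide (k ≤ iv.2)) = false := by
              simp only [Bool.and_eq_false_iff, decide_eq_false_iff_not]
              omega
            simp [hiv]
          · rw [show min (iv.2 + 1) (hi + 1) = hi + 1 by omega,
              PySem.List.pyRange_one_eq_nil (by omega), PySem.List.pyRange_one_eq_nil (by omega)]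
            simp
      · rw [PySem.List.pyRange_one_eq_nil (show hi + 1 ≤ t by omega),
          PySem.List.pyRange_one_eq_nil (show hi + 1 ≤ iv.2 + 1 by omega),
          PySem.List.pyRange_one_eq_nil (show min (iv.1 - 1) hi + 1 ≤ t by omega)]
        simp

-- B's edge routine as filter of the k-range by "covered by no sensor"
lemma pvIv_le (r2 u v : Int) (h : (if u > v then u - v else v - u) ≤ r2) :
    -(PySem.Int.floordiv (r2 - u - v) 2) ≤ PySem.Int.floordiv (u + v + r2) 2 := by
  have e1 := PySem.Int.floordiv_mul_add_mod (r2 - u - v) 2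
  have e2 := PySem.Int.floordiv_mul_add_mod (u + v + r2) 2
  have m1a := PySem.Int.mod_nonneg (r2 - u - v) (show (0:Int) < 2 by norm_num)
  have m1b := PySem.Int.mod_lt (r2 - u - v) (show (0:Int) < 2 by norm_num)
  have m2a := PySem.Int.mod_nonneg (u + v + r2) (show (0:Int) < 2 by norm_num)
  have m2b := PySem.Int.mod_lt (u + v + r2) (show (0:Int) < 2 by norm_num)
  split_ifs at h <;> omega

lemma pvEdgePoints_eq (pairs : List ((Int × Int) × Int)) (mx r x0 gx y0 gy : Int) :
    pvEdgePoints pairs mx r x0 gx y0 gy =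
    ((PySem.List.pyRange (pvLoE mx x0 gx y0 gy) (pvHiE mx r x0 gx y0 gy + 1) 1).filter
      (fun k => !(pairs.any (fun pr => pvCovB pr x0 gx y0 gy k)))).map
      (fun k => (x0 + gx * k, y0 + gy * k)) := by
  simp only [pvEdgePoints]
  simp only [PySem.List.foldl_append_ite]
  rw [show (if gy = 1 then max (if gx = 1 then max 0 (-x0) else max 0 (x0 - mx)) (-y0)
      else max (if gx = 1 then max 0 (-x0) else max 0 (x0 - mx)) (y0 - mx)) = pvLoE mx x0 gx y0 gy from rfl,
    show (if gy = 1 then min (if gx = 1 then min r (mx - x0) else min r x0) (mx - y0)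
      else min (if gx = 1 then min r (mx - x0) else min r x0) y0) = pvHiE mx r x0 gx y0 gy from rfl]
  have hab : ∀ iv ∈ PySem.List.sorted (([] : List (Int × Int)) ++ (pairs.filter (fun pr => decide ((if gx * (pr.1.1 - x0) > gy * (pr.1.2 - y0) then gx * (pr.1.1 - x0) - gy * (pr.1.2 - y0) else gy * (pr.1.2 - y0) - gx * (pr.1.1 - x0)) ≤ pr.2))).map
      (fun pr => ((-(PySem.Int.floordiv (pr.2 - gx * (pr.1.1 - x0) - gy * (pr.1.2 - y0)) 2),
      PySem.Int.floordiv (gx * (pr.1.1 - x0) + gy * (pr.1.2 - y0) + pr.2) 2) : Int × Int))) (fun iv => iv.1) false, iv.1 ≤ iv.2 := by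
    intro iv hm
    rw [PySem.List.mem_sorted, List.nil_append] at hm
    obtain ⟨pr, hpr, rfl⟩ := List.mem_map.mp hm
    have hc := (List.mem_filter.mp hpr).2
    rw [decide_eq_true_eq] at hc
    exact pvIv_le pr.2 _ _ hc
  rw [pvSweep_spec (fun k => (x0 + gx * k, y0 + gy * k)) (pvHiE mx r x0 gx y0 gy) _ (pvLoE mx x0 gx y0 gy) []
    (PySem.List.sorted_pairwise _ _) hab]
  rw [List.nil_append]
  congr 1
  apply List.filter_congr
  intro k _
  congr 1
  rw [List.Perm.any_eq (PySem.List.sorted_perm _ _ _), List.nil_append, List.any_map, List.any_filter]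
  apply PySem.List.any_congr_mem
  intro pr _
  simp [pvCovB]

lemma pvCover_equiv (pr : (Int × Int) × Int) (x0 gx y0 gy k : Int)
    (hgx : gx = 1 ∨ gx = -1) (hgy : gy = 1 ∨ gy = -1) :
    decide ((if pr.1.1 > x0 + gx * k then pr.1.1 - (x0 + gx * k) else (x0 + gx * k) - pr.1.1) +
      (if pr.1.2 > y0 + gy * k then pr.1.2 - (y0 + gy * k) else (y0 + gy * k) - pr.1.2) ≤ pr.2)
    = pvCovB pr x0 gx y0 gy k := by
  have e1 := PySem.Int.floordiv_mul_add_mod (pr.2 - gx * (pr.1.1 - x0) - gy * (pr.1.2 - y0)) 2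
  have e2 := PySem.Int.floordiv_mul_add_mod (gx * (pr.1.1 - x0) + gy * (pr.1.2 - y0) + pr.2) 2
  have m1a := PySem.Int.mod_nonneg (pr.2 - gx * (pr.1.1 - x0) - gy * (pr.1.2 - y0)) (show (0:Int) < 2 by norm_num)
  have m1b := PySem.Int.mod_lt (pr.2 - gx * (pr.1.1 - x0) - gy * (pr.1.2 - y0)) (show (0:Int) < 2 by norm_num)
  have m2a := PySem.Int.mod_nonneg (gx * (pr.1.1 - x0) + gy * (pr.1.2 - y0) + pr.2) (show (0:Int) < 2 by norm_num)
  have m2b := PySem.Int.mod_lt (gx * (pr.1.1 - x0) + gy * (pr.1.2 - y0) + pr.2) (show (0:Int) < 2 by norm_num)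
  rw [Bool.eq_iff_iff]
  simp only [pvCovB, Bool.and_eq_true, decide_eq_true_eq]
  rcases hgx with rfl | rfl <;> rcases hgy with rfl | rfl <;>
    simp only [one_mul, neg_mul] at * <;> split_ifs <;> omega

lemma pvBounds_eq (mx r x0 gx y0 gy k : Int)
    (hgx : gx = 1 ∨ gx = -1) (hgy : gy = 1 ∨ gy = -1) (h0 : 0 ≤ k) (h1 : k ≤ r) :
    (!(decide (x0 + gx * k < 0 ∨ x0 + gx * k > mx ∨ y0 + gy * k < 0 ∨ y0 + gy * k > mx))) =
      (decide (pvLoE mx x0 gx y0 gy ≤ k) && decide (k ≤ pvHiE mx r x0 gx y0 gy)) := by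
  rw [Bool.eq_iff_iff]
  simp only [pvLoE, pvHiE, Bool.and_eq_true, decide_eq_true_eq, Bool.not_eq_eq_eq_not,
    Bool.not_true, decide_eq_false_iff_not]
  rcases hgx with rfl | rfl <;> rcases hgy with rfl | rfl <;>
    simp only [one_mul, neg_mul] <;> norm_num <;> omega

lemma pvLoE_nonneg (mx x0 gx y0 gy : Int) : 0 ≤ pvLoE mx x0 gx y0 gy := by
  simp only [pvLoE]
  split_ifs <;> omega

lemma pvHiE_le (mx r x0 gx y0 gy : Int) : pvHiE mx r x0 gx y0 gy ≤ r := by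
  simp only [pvHiE]
  split_ifs <;> omega

-- one edge of A's perimeter loop equals B's edge routine
lemma pvEdgeChunk (sl : List (Int × Int)) (rl : List Int) (mx : Int) (idx : List Int)
    (s : Int × Int) (r x0 gx y0 gy off : Int)
    (hgx : gx = 1 ∨ gx = -1) (hgy : gy = 1 ∨ gy = -1)
    (hx : ∀ k : Int, 0 ≤ k → k < r + 1 → pvXA s r (off + k) = x0 + gx * k)
    (hy : ∀ k : Int, 0 ≤ k → k < r + 1 → pvYA s r (off + k) = y0 + gy * k) :
    ((PySem.List.pyRange off (off + (r + 1)) 1).filter (pvGoodA sl rl idx mx s r)).map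
      (fun j => (pvXA s r j, pvYA s r j))
    = pvEdgePoints (idx.map (pvMk sl rl)) mx r x0 gx y0 gy := by
  rw [pvEdgePoints_eq, pvPyRange_shift off (off + (r + 1)), show off + (r + 1) - off = r + 1 by ring,
    List.filter_map, List.map_map]
  have hQ : ∀ k ∈ PySem.List.pyRange 0 (r + 1) 1,
      (pvGoodA sl rl idx mx s r ∘ fun k => off + k) k =
      ((!((idx.map (pvMk sl rl)).any (fun pr => pvCovB pr x0 gx y0 gy k))) &&
        (decide (pvLoE mx x0 gx y0 gy ≤ k) && decide (k ≤ pvHiE mx r x0 gx y0 gy))) := by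
    intro k hk
    rw [PySem.List.mem_pyRange_one] at hk
    simp only [Function.comp, pvGoodA]
    rw [hx k (by omega) (by omega), hy k (by omega) (by omega),
      pvIsPossibleA_eq_not_any, List.any_map,
      pvBounds_eq mx r x0 gx y0 gy k hgx hgy (by omega) (by omega)]
    rw [Bool.and_comm]
    congr 1
    congr 1
    apply PySem.List.any_congr_mem
    intro j _
    exact pvCover_equiv (pvMk sl rl j) x0 gx y0 gy k hgx hgy
  rw [List.filter_congr hQ, ← List.filter_filter,
    pvFilter_le_le_pyRange (pvLoE mx x0 gx y0 gy) (pvHiE mx r x0 gx y0 gy) (r + 1 - 0).toNat 0 (r+1) rfl,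
    show max 0 (pvLoE mx x0 gx y0 gy) = pvLoE mx x0 gx y0 gy by
      have := pvLoE_nonneg mx x0 gx y0 gy; omega,
    show min (r + 1) (pvHiE mx r x0 gx y0 gy + 1) = pvHiE mx r x0 gx y0 gy + 1 by
      have := pvHiE_le mx r x0 gx y0 gy; omega]
  apply List.map_congr_left
  intro k hkf
  have hk := List.mem_filter.mp hkf |>.1
  rw [PySem.List.mem_pyRange_one] at hk
  have hlo := pvLoE_nonneg mx x0 gx y0 gy
  have hhi := pvHiE_le mx r x0 gx y0 gy
  simp only [Function.comp]
  rw [hx k (by omega) (by omega), hy k (by omega) (by omega)]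

lemma pvIf_shape {α : Type} (P : Prop) [Decidable P] (b : Bool) (acc : List α) (x : α) :
    (if P then acc else if b = true then acc ++ [x] else acc) =
    (if (!decide P && b) = true then acc ++ [x] else acc) := by
  by_cases hP : P <;> cases b <;> simp [hP]

lemma pvA_inner (sl : List (Int × Int)) (rl : List Int) (mx : Int) (idx : List Int)
    (s : Int × Int) (r : Int) (acc : List (Int × Int)) :
    (PySem.List.pyRange 0 (4 * (r + 1)) 1).foldl (fun acc j =>
      if pvXA s r j < 0 ∨ pvXA s r j > mx ∨ pvYA s r j < 0 ∨ pvYA s r j > mx then acc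
      else if pvIsPossibleA sl rl (pvXA s r j) (pvYA s r j) idx = true then
        acc ++ [(pvXA s r j, pvYA s r j)]
      else acc) acc
    = acc ++ ((PySem.List.pyRange 0 (4 * (r + 1)) 1).filter (pvGoodA sl rl idx mx s r)).map
        (fun j => (pvXA s r j, pvYA s r j)) := by
  refine Eq.trans (PySem.List.foldl_congr_mem _ _
    (fun acc j => if pvGoodA sl rl idx mx s r j = true then acc ++ [(pvXA s r j, pvYA s r j)] else acc) _
    (fun acc j _ => pvIf_shape _ _ acc _)) ?_
  exact PySem.List.foldl_append_if _ _ _ _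

lemma pvPerSensor (sl : List (Int × Int)) (rl : List Int) (mx : Int) (idx : List Int)
    (s : Int × Int) (r : Int) :
    ((PySem.List.pyRange 0 (4 * (r + 1)) 1).filter (pvGoodA sl rl idx mx s r)).map
      (fun j => (pvXA s r j, pvYA s r j))
    = pvEdgePoints (idx.map (pvMk sl rl)) mx r s.1 1 (s.2 - (r + 1)) 1 ++
      (pvEdgePoints (idx.map (pvMk sl rl)) mx r (s.1 + r + 1) (-1) s.2 1 ++
       (pvEdgePoints (idx.map (pvMk sl rl)) mx r s.1 (-1) (s.2 + r + 1) (-1) ++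
        pvEdgePoints (idx.map (pvMk sl rl)) mx r (s.1 - (r + 1)) 1 s.2 (-1))) := by
  by_cases hr : 0 ≤ r
  · have h1 := pvEdgeChunk sl rl mx idx s r s.1 1 (s.2 - (r + 1)) 1 0 (Or.inl rfl) (Or.inl rfl)
      (by intro k h0 h1; simp only [pvXA]; split_ifs <;> omega)
      (by intro k h0 h1; simp only [pvYA]; split_ifs <;> omega)
    have h2 := pvEdgeChunk sl rl mx idx s r (s.1 + r + 1) (-1) s.2 1 (r + 1) (Or.inr rfl) (Or.inl rfl)
      (by intro k h0 h1; simp only [pvXA]; split_ifs <;> omega)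
      (by intro k h0 h1; simp only [pvYA]; split_ifs <;> omega)
    have h3 := pvEdgeChunk sl rl mx idx s r s.1 (-1) (s.2 + r + 1) (-1) (2 * (r + 1)) (Or.inr rfl) (Or.inr rfl)
      (by intro k h0 h1; simp only [pvXA]; split_ifs <;> omega)
      (by intro k h0 h1; simp only [pvYA]; split_ifs <;> omega)
    have h4 := pvEdgeChunk sl rl mx idx s r (s.1 - (r + 1)) 1 s.2 (-1) (3 * (r + 1)) (Or.inl rfl) (Or.inr rfl)
      (by intro k h0 h1; simp only [pvXA]; split_ifs <;> omega)
      (by intro k h0 h1; simp only [pvYA]; split_ifs <;> omega)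
    rw [show (0:Int) + (r + 1) = r + 1 by ring] at h1
    rw [show (r + 1 : Int) + (r + 1) = 2 * (r + 1) by ring] at h2
    rw [show (2 * (r + 1) : Int) + (r + 1) = 3 * (r + 1) by ring] at h3
    rw [show (3 * (r + 1) : Int) + (r + 1) = 4 * (r + 1) by ring] at h4
    rw [PySem.List.pyRange_one_append 0 (r + 1) (4 * (r + 1)) (by omega) (by omega),
      PySem.List.pyRange_one_append (r + 1) (2 * (r + 1)) (4 * (r + 1)) (by omega) (by omega),
      PySem.List.pyRange_one_append (2 * (r + 1)) (3 * (r + 1)) (4 * (r + 1)) (by omega) (by omega),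
      List.filter_append, List.filter_append, List.filter_append,
      List.map_append, List.map_append, List.map_append, h1, h2, h3, h4]
  · rw [PySem.List.pyRange_one_eq_nil (by omega)]
    rw [pvEdgePoints_eq, pvEdgePoints_eq, pvEdgePoints_eq, pvEdgePoints_eq,
      PySem.List.pyRange_one_eq_nil (by
        have := pvLoE_nonneg mx s.1 1 (s.2 - (r + 1)) 1
        have := pvHiE_le mx r s.1 1 (s.2 - (r + 1)) 1
        omega),
      PySem.List.pyRange_one_eq_nil (by
        have := pvLoE_nonneg mx (s.1 + r + 1) (-1) s.2 1
        have := pvHiE_le mx r (s.1 + r + 1) (-1) s.2 1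
        omega),
      PySem.List.pyRange_one_eq_nil (by
        have := pvLoE_nonneg mx s.1 (-1) (s.2 + r + 1) (-1)
        have := pvHiE_le mx r s.1 (-1) (s.2 + r + 1) (-1)
        omega),
      PySem.List.pyRange_one_eq_nil (by
        have := pvLoE_nonneg mx (s.1 - (r + 1)) 1 s.2 (-1)
        have := pvHiE_le mx r (s.1 - (r + 1)) 1 s.2 (-1)
        omega)]
    simp

lemma pvPossible_eq (sl : List (Int × Int)) (rl : List Int) (mx : Int) (idx : List Int) :
    idx.foldl (fun acc i =>
      (PySem.List.pyRange 0 (4 * (PySem.List.pyGetD rl i 0 + 1)) 1).foldl (fun acc j =>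
        if pvXA (PySem.List.pyGetD sl i ((0:Int),(0:Int))) (PySem.List.pyGetD rl i 0) j < 0 ∨
           pvXA (PySem.List.pyGetD sl i ((0:Int),(0:Int))) (PySem.List.pyGetD rl i 0) j > mx ∨
           pvYA (PySem.List.pyGetD sl i ((0:Int),(0:Int))) (PySem.List.pyGetD rl i 0) j < 0 ∨
           pvYA (PySem.List.pyGetD sl i ((0:Int),(0:Int))) (PySem.List.pyGetD rl i 0) j > mx then acc
        else if pvIsPossibleA sl rl
            (pvXA (PySem.List.pyGetD sl i ((0:Int),(0:Int))) (PySem.List.pyGetD rl i 0) j)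
            (pvYA (PySem.List.pyGetD sl i ((0:Int),(0:Int))) (PySem.List.pyGetD rl i 0) j) idx = true then
          acc ++ [(pvXA (PySem.List.pyGetD sl i ((0:Int),(0:Int))) (PySem.List.pyGetD rl i 0) j,
                   pvYA (PySem.List.pyGetD sl i ((0:Int),(0:Int))) (PySem.List.pyGetD rl i 0) j)]
        else acc) acc) []
    = (idx.map (pvMk sl rl)).foldl (fun acc pr =>
        ([(pr.1.1, 1, pr.1.2 - (pr.2 + 1), 1), (pr.1.1 + pr.2 + 1, -1, pr.1.2, 1),
          (pr.1.1, -1, pr.1.2 + pr.2 + 1, -1), (pr.1.1 - (pr.2 + 1), 1, pr.1.2, -1)] :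
            List (Int × Int × Int × Int)).foldl
          (fun acc e => acc ++ pvEdgePoints (idx.map (pvMk sl rl)) mx pr.2 e.1 e.2.1 e.2.2.1 e.2.2.2) acc) [] := by
  refine Eq.trans (PySem.List.foldl_congr_mem _ _
    (fun acc i => acc ++
      ((PySem.List.pyRange 0 (4 * (PySem.List.pyGetD rl i 0 + 1)) 1).filter
        (pvGoodA sl rl idx mx (PySem.List.pyGetD sl i ((0:Int),(0:Int))) (PySem.List.pyGetD rl i 0))).map
        (fun j => (pvXA (PySem.List.pyGetD sl i ((0:Int),(0:Int))) (PySem.List.pyGetD rl i 0) j,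
                   pvYA (PySem.List.pyGetD sl i ((0:Int),(0:Int))) (PySem.List.pyGetD rl i 0) j))) _
    (fun acc i _ => pvA_inner sl rl mx idx _ _ acc)) ?_
  simp only [PySem.List.foldl_append_eq_flatMap, List.nil_append]
  rw [List.flatMap_map]
  congr 1
  funext i
  simp only [List.flatMap_cons, List.flatMap_nil, List.append_nil]
  exact pvPerSensor sl rl mx idx (PySem.List.pyGetD sl i ((0:Int),(0:Int))) (PySem.List.pyGetD rl i 0)

-- ===== VERDICT (by name: the statement is the Claim_ definition above) =====
theorem find_possible_locations_fast_spec : Claim_equal_find_possible_locations_fast := by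
  unfold Claim_equal_find_possible_locations_fast
  intro sl rl mx _ _
  unfold Spec_find_possible_locations_fast
  simp only [find_possible_locations_fast, find_possible_locations_fast_alt]
  exact congrArg PySem.Set.ofList (pvPossible_eq sl rl mx
    (PySem.List.sorted (PySem.List.pyRange 0 (sl.length : Int) 1) (fun i => PySem.List.pyGetD rl i 0) true))
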